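-- pv_equiv track=rewrite | github.com/CJTM23/Math_classes | Fundamentos_de_programacion/part_clase_1.py | calcularpuntaje
-- ===== SOURCE A (Python) =====
-- def calcularpuntaje(palabra):
--     total = 0
--     for pos, letra in enumerate(palabra):
--         if letra in "aeiou":
--             total -=pos
--         else:
--              total += pos
--     return total
-- ===== SOURCE B (Python) =====
-- def calcularpuntaje(palabra):
--     pos_sum = {}
--     for pos, letra in enumerate(palabra):
--         pos_sum[letra] = pos_sum.get(letra, 0) + pos
--     total = 0
--     for letra, s in pos_sum.items():
--         if letra in "aeiou":
--             total -= s
--         else: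
--             total += s
--     return total
-- ===== Notes on version B (the rewrite author's own statement) =====
-- stated objective: alternative
-- what changed: B first builds a per-character position-sum index (a dict grouping the word by character in one pass with no vowel test), then scores each DISTINCT character once by applying the vowel sign to its aggregated position sum, instead of A's signed accumulation per character.
import Mathlib
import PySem

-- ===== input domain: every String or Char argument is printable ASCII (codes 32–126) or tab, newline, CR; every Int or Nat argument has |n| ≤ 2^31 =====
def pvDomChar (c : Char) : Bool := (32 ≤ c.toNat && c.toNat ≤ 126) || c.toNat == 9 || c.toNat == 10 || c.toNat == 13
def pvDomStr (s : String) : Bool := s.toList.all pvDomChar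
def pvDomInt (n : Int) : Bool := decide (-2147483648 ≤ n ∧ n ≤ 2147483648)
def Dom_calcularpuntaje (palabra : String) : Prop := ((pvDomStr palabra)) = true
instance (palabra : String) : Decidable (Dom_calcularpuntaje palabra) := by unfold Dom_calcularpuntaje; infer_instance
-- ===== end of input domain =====

-- B groups the word into a per-character position-sum dict in one pass (no vowel test), then
-- scores each distinct character once with the vowel sign (objective: alternative).

-- ===== PORT A =====
def calcularpuntaje (palabra : String) : Int :=
  (PySem.List.enumerate palabra.toList 0).foldl
    (fun total pl => if pl.2 ∈ "aeiou".toList then total - pl.1 else total + pl.1) 0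

-- ===== PORT B =====
def calcularpuntaje_alt (palabra : String) : Int :=
  let posSum : PySem.Dict Char Int :=
    (PySem.List.enumerate palabra.toList 0).foldl
      (fun d pl => d.insert pl.2 (d.getD pl.2 0 + pl.1)) PySem.Dict.empty
  posSum.items.foldl
    (fun total q => if q.1 ∈ "aeiou".toList then total - q.2 else total + q.2) 0

-- ===== PRECONDITION & SPEC =====
def Spec_calcularpuntaje (palabra : String) (out : Int) : Prop := out = calcularpuntaje_alt palabra
instance (palabra : String) (out : Int) : Decidable (Spec_calcularpuntaje palabra out) := by unfold Spec_calcularpuntaje; infer_instance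

-- ===== CLAIM (what is proved, stated in full; the proofs are below) =====
def Claim_equal_calcularpuntaje : Prop := ∀ (palabra : String), Dom_calcularpuntaje palabra → Spec_calcularpuntaje palabra (calcularpuntaje palabra)

-- ===== LEMMAS AND PROOFS =====

-- the per-character sign: -1 on vowels, +1 otherwise
def pvSgn (c : Char) : Int := if c ∈ "aeiou".toList then -1 else 1

-- the signed score of a dict, read off its keys
def pvScore (d : PySem.Dict Char Int) : Int :=
  (d.keys.map (fun k => pvSgn k * d.getD k 0)).sum

-- a fold of signed additions is the accumulator plus the signed sum (A's loop and B's second loop)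
theorem foldSigned_eq (l : List (Char × Int)) (a : Int) :
    l.foldl (fun total q => if q.1 ∈ "aeiou".toList then total - q.2 else total + q.2) a
      = a + (l.map (fun q => pvSgn q.1 * q.2)).sum := by
  induction l generalizing a with
  | nil => simp
  | cons q l ih =>
      simp only [List.foldl_cons, List.map_cons, List.sum_cons, ih, pvSgn]
      split_ifs <;> ring

-- A's loop likewise
theorem foldA_eq (l : List (Int × Char)) (a : Int) :
    l.foldl (fun total pl => if pl.2 ∈ "aeiou".toList then total - pl.1 else total + pl.1) a
      = a + (l.map (fun p => pvSgn p.2 * p.1)).sum := by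
  induction l generalizing a with
  | nil => simp
  | cons p l ih =>
      simp only [List.foldl_cons, List.map_cons, List.sum_cons, ih, pvSgn]
      split_ifs <;> ring

-- updating a sum at one key of a duplicate-free list
theorem sum_map_update (ks : List Char) (c : Char) (f f' : Char → Int)
    (hnd : ks.Nodup) (hc : c ∈ ks) (hne : ∀ k ∈ ks, k ≠ c → f' k = f k) :
    (ks.map f').sum = (ks.map f).sum + (f' c - f c) := by
  induction ks with
  | nil => cases hc
  | cons k ks ih =>
      rcases List.nodup_cons.mp hnd with ⟨hk, hnd'⟩
      simp only [List.map_cons, List.sum_cons]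
      rcases List.mem_cons.mp hc with h | h
      · subst h
        have : ks.map f' = ks.map f := by
          apply List.map_congr_left
          intro x hx
          exact hne x (List.mem_cons_of_mem _ hx) (by rintro rfl; exact hk hx)
        rw [this]; ring
      · have hkc : k ≠ c := by rintro rfl; exact hk h
        rw [hne k (List.mem_cons_self) hkc,
          ih hnd' h (fun x hx hxc => hne x (List.mem_cons_of_mem _ hx) hxc)]
        ring

-- one grouping step changes the score by the signed position
theorem score_insert (d : PySem.Dict Char Int) (c : Char) (p : Int)
    (hnd : d.keys.Nodup) :
    pvScore (d.insert c (d.getD c 0 + p)) = pvScore d + pvSgn c * p := by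
  unfold pvScore
  by_cases hc : d.contains c = true
  · rw [PySem.Dict.keys_insert_of_contains _ _ hc]
    rw [sum_map_update d.keys c
      (fun k => pvSgn k * d.getD k 0)
      (fun k => pvSgn k * (d.insert c (d.getD c 0 + p)).getD k 0)
      hnd ((PySem.Dict.contains_iff_mem_keys _ _).mp hc)
      (fun k _ hkc => by simp only []; rw [PySem.Dict.getD_insert]; simp [hkc])]
    rw [PySem.Dict.getD_insert]
    simp; ring
  · have hc' : d.contains c = false := by simpa using hc
    rw [PySem.Dict.keys_insert_of_not_contains _ _ hc']
    have hmem : c ∉ d.keys := fun h =>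
      hc ((PySem.Dict.contains_iff_mem_keys _ _).mpr h)
    rw [List.map_append, List.sum_append]
    have : d.keys.map (fun k => pvSgn k * (d.insert c (d.getD c 0 + p)).getD k 0)
        = d.keys.map (fun k => pvSgn k * d.getD k 0) := by
      apply List.map_congr_left
      intro k hk
      have hkc : k ≠ c := by rintro rfl; exact hmem hk
      rw [PySem.Dict.getD_insert]
      simp [hkc]
    rw [this]
    rw [PySem.Dict.getD_of_not_contains _ _ hc']
    simp [PySem.Dict.getD_insert]

-- the grouping loop's score is the signed position sum of the processed pairs
theorem score_foldGroup (l : List (Int × Char)) (d : PySem.Dict Char Int)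
    (hnd : d.keys.Nodup) :
    pvScore (l.foldl (fun d pl => d.insert pl.2 (d.getD pl.2 0 + pl.1)) d)
      = pvScore d + (l.map (fun p => pvSgn p.2 * p.1)).sum := by
  induction l generalizing d with
  | nil => simp
  | cons p l ih =>
      simp only [List.foldl_cons, List.map_cons, List.sum_cons]
      rw [ih _ (PySem.Dict.nodup_keys_insert _ _ _ hnd), score_insert _ _ _ hnd]
      ring

-- B's second loop over d.items computes pvScore d (keys duplicate-free)
theorem foldItems_eq_score (d : PySem.Dict Char Int) (hnd : d.keys.Nodup) :
    d.items.foldl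
      (fun total q => if q.1 ∈ "aeiou".toList then total - q.2 else total + q.2) 0
      = pvScore d := by
  rw [foldSigned_eq, PySem.Dict.items_eq_map_keys d hnd 0]
  unfold pvScore
  simp [List.map_map, Function.comp_def]

-- ===== VERDICT (by name: the statement is the Claim_ definition above) =====
theorem calcularpuntaje_spec : Claim_equal_calcularpuntaje := by
  intro palabra _
  unfold Spec_calcularpuntaje calcularpuntaje calcularpuntaje_alt
  rw [foldA_eq, foldItems_eq_score, score_foldGroup]
  · simp [pvScore]
  · exact PySem.Dict.nodup_keys_empty
  · exact PySem.Dict.nodup_keys_foldl_insert_key _ Prod.snd _ _ PySem.Dict.nodup_keys_empty
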